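-- pv_equiv track=rewrite | github.com/patel-dhairya/Python-Algo | RecurseAlgos.py | reverse_object
-- ===== SOURCE A (Python) =====
-- def reverse_object(obj):
--     """
--     Returns the reversed object if it is possible
--     :param obj: Reference to original object
--     :return: Reversed object
--     """
--     object_type = type(obj)
--     empty_object = object_type()
--
--     if obj == empty_object:
--         return empty_object
--
--     remain_to_reverse = reverse_object(obj[1:])
--     first = obj[:1]
--
--     result = remain_to_reverse + first
--
--     return result
-- ===== SOURCE B (Python) =====
-- def reverse_object(obj):
--     """Iterative rewrite: prepend each single-element slice to an accumulator (no recursion)."""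
--     result = type(obj)()
--     for i in range(len(obj)):
--         result = obj[i:i+1] + result
--     return result
-- ===== Notes on version B (the rewrite author's own statement) =====
-- stated objective: simpler
-- what changed: Replaced the recursion (reverse tail, append head slice) by a flat accumulator loop that prepends each single-element slice, eliminating recursion depth and the equality-to-empty base case.
import Mathlib
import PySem

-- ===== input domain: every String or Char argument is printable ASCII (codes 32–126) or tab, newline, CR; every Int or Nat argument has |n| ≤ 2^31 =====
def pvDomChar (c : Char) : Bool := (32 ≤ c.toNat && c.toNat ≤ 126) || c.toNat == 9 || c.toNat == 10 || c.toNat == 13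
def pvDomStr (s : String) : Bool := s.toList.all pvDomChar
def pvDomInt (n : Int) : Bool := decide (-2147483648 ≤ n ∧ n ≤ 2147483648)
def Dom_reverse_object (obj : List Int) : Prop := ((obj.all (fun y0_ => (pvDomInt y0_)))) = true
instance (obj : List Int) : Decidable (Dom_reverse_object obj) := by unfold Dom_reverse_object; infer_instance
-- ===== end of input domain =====

-- B replaces A's recursion by a flat accumulator loop prepending single-element slices (simpler decomposition, same O(n^2) cost).

-- ===== PORT A =====
-- literal port of A: recurse on obj[1:], append obj[:1]
def reverse_object (obj : List Int) : List Int :=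
  if obj = [] then []
  else
    let remain_to_reverse := reverse_object (PySem.List.slice obj (some 1) none)
    let first := PySem.List.slice obj none (some 1)
    remain_to_reverse ++ first
termination_by obj.length
decreasing_by
  rename_i h
  rw [PySem.List.slice_from_one]
  cases obj with
  | nil => exact absurd rfl h
  | cons a l => simp

-- ===== PORT B =====
-- literal port of Source B: result = []; for i in range(len(obj)): result = obj[i:i+1] + result
def reverse_object_alt (obj : List Int) : List Int :=
  (PySem.List.pyRange 0 (obj.length : Int) 1).foldl
    (fun result i => PySem.List.slice obj (some i) (some (i + 1)) ++ result) []

-- ===== PRECONDITION & SPEC =====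
def Spec_reverse_object (obj : List Int) (out : List Int) : Prop := out = reverse_object_alt obj
instance (obj : List Int) (out : List Int) : Decidable (Spec_reverse_object obj out) := by unfold Spec_reverse_object; infer_instance

-- ===== CLAIM (what is proved, stated in full; the proofs are below) =====
def Claim_equal_reverse_object : Prop := ∀ (obj : List Int), Dom_reverse_object obj → Spec_reverse_object obj (reverse_object obj)

-- ===== LEMMAS AND PROOFS =====

theorem reverse_object_eq_reverse (obj : List Int) : reverse_object obj = obj.reverse := by
  induction obj with
  | nil => simp [reverse_object]
  | cons a l ih =>
    rw [reverse_object]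
    simp only [List.cons_ne_nil, if_false]
    rw [PySem.List.slice_from_one]
    have h1 : PySem.List.slice (a :: l) none (some 1) = [a] := by
      have : (1 : Int) = ((1 : Nat) : Int) := rfl
      rw [this, PySem.List.slice_to_natCast]
      simp
    simp [h1, ih]

theorem alt_loop (obj : List Int) (a : Nat) (init : List Int) :
    (PySem.List.pyRange (a : Int) (obj.length : Int) 1).foldl
      (fun result i => PySem.List.slice obj (some i) (some (i + 1)) ++ result) init
    = (obj.drop a).reverse ++ init := by
  by_cases h : obj.length ≤ a
  · rw [PySem.List.pyRange_one_eq_nil (by exact_mod_cast h)]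
    simp [List.drop_eq_nil_of_le h]
  · rw [not_le] at h
    rw [PySem.List.pyRange_one_cons (by exact_mod_cast h)]
    have hsl : PySem.List.slice obj (some (a : Int)) (some ((a : Int) + 1)) = (obj.drop a).take 1 := by
      have := PySem.List.slice_natCast_add obj a 1
      simpa using this
    obtain ⟨x, rest, hd⟩ : ∃ x rest, obj.drop a = x :: rest := by
      cases hdrop : obj.drop a with
      | nil => exact absurd (List.drop_eq_nil_iff.mp hdrop) (by omega)
      | cons x rest => exact ⟨x, rest, rfl⟩
    have hd1 : obj.drop (a + 1) = rest := by
      rw [← List.drop_drop, hd]; rfl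
    have hcast : ((a : Int) + 1) = ((a + 1 : Nat) : Int) := by push_cast; ring
    rw [List.foldl_cons, hsl, hd, hcast, alt_loop obj (a + 1)]
    simp [hd1]
termination_by obj.length - a

theorem reverse_object_alt_eq_reverse (obj : List Int) : reverse_object_alt obj = obj.reverse := by
  have := alt_loop obj 0 []
  simpa [reverse_object_alt] using this

-- ===== VERDICT (by name: the statement is the Claim_ definition above) =====
theorem reverse_object_spec : Claim_equal_reverse_object := by
  intro obj _
  unfold Spec_reverse_object
  rw [reverse_object_eq_reverse, reverse_object_alt_eq_reverse]
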